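-- pv_equiv track=rewrite | github.com/ilybevy/article-timeline | fn/make_details.py | aggregate_segment_stats
-- ===== SOURCE A (Python) =====
-- def aggregate_segment_stats(year_index, start_year, end_year):
--     total_papers = 0
--     total_citations = 0
--     for y in range(start_year, end_year + 1):
--         docs = year_index.get(y, [])
--         total_papers += len(docs)
--         total_citations += sum(d["citation_count"] for d in docs)
--     return total_papers, total_citations
-- ===== SOURCE B (Python) =====
-- def aggregate_segment_stats(year_index, start_year, end_year):
--     pool = [d for y, docs in year_index.items()
--             if start_year <= y <= end_year
--             for d in docs]
--     return len(pool), sum(d["citation_count"] for d in pool)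
-- ===== Notes on version B (the rewrite author's own statement) =====
-- stated objective: idiomatic
-- what changed: B replaces A's loop over the contiguous integer range with dict.get per year by a single data-driven pass over year_index.items(): it flattens the documents of in-range years into one list and returns its length and citation sum, so absent years are never touched.
import Mathlib
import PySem

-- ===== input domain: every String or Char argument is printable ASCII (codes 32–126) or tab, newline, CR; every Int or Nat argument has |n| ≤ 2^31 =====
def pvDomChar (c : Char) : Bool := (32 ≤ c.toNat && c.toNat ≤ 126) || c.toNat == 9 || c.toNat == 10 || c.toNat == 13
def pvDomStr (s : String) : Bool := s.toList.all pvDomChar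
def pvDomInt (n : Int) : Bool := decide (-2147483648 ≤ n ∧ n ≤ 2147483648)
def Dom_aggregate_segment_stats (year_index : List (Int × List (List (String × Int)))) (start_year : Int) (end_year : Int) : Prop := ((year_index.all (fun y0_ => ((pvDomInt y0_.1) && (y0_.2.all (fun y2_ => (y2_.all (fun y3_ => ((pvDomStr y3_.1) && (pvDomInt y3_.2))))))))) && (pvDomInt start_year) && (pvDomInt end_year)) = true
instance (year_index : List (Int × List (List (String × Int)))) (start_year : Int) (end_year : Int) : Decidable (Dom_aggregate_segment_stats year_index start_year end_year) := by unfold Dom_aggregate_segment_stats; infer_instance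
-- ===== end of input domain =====

-- B replaces A's loop over the contiguous year range (with dict.get per year) by one
-- data-driven pass over the entries of year_index, flattening the in-range documents
-- into a single list; objective: idiomatic, not faster.

-- ===== PORT A =====
-- d["citation_count"]: first-match association-list lookup; the KeyError case (key
-- absent) is excluded by Pre_, where this helper's 0 default is never reached.
def citeOf (d : List (String × Int)) : Int :=
  match d.find? (fun p => p.1 == "citation_count") with
  | some p => p.2
  | none => 0

-- year_index.get(y, []): first-match association-list lookup with default [].
def getYear (year_index : List (Int × List (List (String × Int)))) (y : Int) :
    List (List (String × Int)) :=
  match year_index.find? (fun p => p.1 == y) with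
  | some p => p.2
  | none => []

def aggregate_segment_stats (year_index : List (Int × List (List (String × Int)))) (start_year : Int) (end_year : Int) : Int × Int :=
  (PySem.List.pyRange start_year (end_year + 1) 1).foldl
    (fun acc y =>
      let docs := getYear year_index y
      (acc.1 + (docs.length : Int), acc.2 + (docs.map citeOf).sum))
    (0, 0)

-- ===== PORT B =====
def aggregate_segment_stats_alt (year_index : List (Int × List (List (String × Int)))) (start_year : Int) (end_year : Int) : Int × Int :=
  let pool := (year_index.filter
      (fun p => decide (start_year ≤ p.1 ∧ p.1 ≤ end_year))).flatMap (fun p => p.2)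
  ((pool.length : Int), (pool.map citeOf).sum)

-- ===== PRECONDITION & SPEC =====
-- Pre_ excludes (a) association lists whose year keys repeat — a Python dict cannot have
-- duplicate keys, so such lists represent no Python input — and (b) inputs where some
-- in-range document lacks the "citation_count" key, on which A raises KeyError.
def Pre_aggregate_segment_stats (year_index : List (Int × List (List (String × Int)))) (start_year : Int) (end_year : Int) : Prop :=
  (year_index.map Prod.fst).Nodup ∧
  ∀ p ∈ year_index, (start_year ≤ p.1 ∧ p.1 ≤ end_year) →
    ∀ d ∈ p.2, "citation_count" ∈ d.map Prod.fst
instance (year_index : List (Int × List (List (String × Int)))) (start_year : Int) (end_year : Int) : Decidable (Pre_aggregate_segment_stats year_index start_year end_year) := by unfold Pre_aggregate_segment_stats; infer_instance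

def pvWitness_aggregate_segment_stats : (List (Int × List (List (String × Int)))) × Int × Int :=
  ([(2020, [[("citation_count", 3)]]), (2022, [])], 2020, 2021)

def Spec_aggregate_segment_stats (year_index : List (Int × List (List (String × Int)))) (start_year : Int) (end_year : Int) (out : Int × Int) : Prop := out = aggregate_segment_stats_alt year_index start_year end_year
instance (year_index : List (Int × List (List (String × Int)))) (start_year : Int) (end_year : Int) (out : Int × Int) : Decidable (Spec_aggregate_segment_stats year_index start_year end_year out) := by unfold Spec_aggregate_segment_stats; infer_instance

-- ===== CLAIM (what is proved, stated in full; the proofs are below) =====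
def Claim_equal_aggregate_segment_stats : Prop := ∀ (year_index : List (Int × List (List (String × Int)))) (start_year : Int) (end_year : Int), Dom_aggregate_segment_stats year_index start_year end_year → Pre_aggregate_segment_stats year_index start_year end_year → Spec_aggregate_segment_stats year_index start_year end_year (aggregate_segment_stats year_index start_year end_year)

-- ===== LEMMAS AND PROOFS =====

theorem getYear_of_not_mem (year_index : List (Int × List (List (String × Int)))) (y : Int)
    (h : y ∉ year_index.map Prod.fst) : getYear year_index y = [] := by
  unfold getYear
  rw [List.find?_eq_none.mpr]
  intro p hp
  simp only [beq_iff_eq]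
  intro hpy
  exact h (List.mem_map.mpr ⟨p, hp, hpy⟩)

theorem getYear_cons (k : Int) (v : List (List (String × Int)))
    (rest : List (Int × List (List (String × Int)))) (y : Int) :
    getYear ((k, v) :: rest) y = if k = y then v else getYear rest y := by
  unfold getYear
  by_cases h : k = y
  · simp [List.find?, h]
  · have hb : (k == y) = false := by simp [h]
    simp only [List.find?, hb]
    rw [if_neg h]

-- Summing F over an if-lookup at a key absent from rest, across a duplicate-free list of years.
theorem sum_if_key (F : List (List (String × Int)) → Int) (hF : F [] = 0)
    (k : Int) (v : List (List (String × Int))) (rest : List (Int × List (List (String × Int))))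
    (hk : k ∉ rest.map Prod.fst) :
    ∀ (R : List Int), R.Nodup →
      (R.map (fun y => F (if k = y then v else getYear rest y))).sum
        = (if k ∈ R then F v else 0) + (R.map (fun y => F (getYear rest y))).sum := by
  intro R
  induction R with
  | nil => simp
  | cons y R' ih =>
    intro hR
    have hR' := (List.nodup_cons.mp hR).2
    have hy := (List.nodup_cons.mp hR).1
    simp only [List.map_cons, List.sum_cons, ih hR']
    by_cases hky : k = y
    · subst hky
      have h1 : getYear rest k = [] := getYear_of_not_mem rest k hk
      simp [h1, hF, hy]
    · simp only [if_neg hky, List.mem_cons]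
      rw [if_congr (or_iff_right hky) rfl rfl]
      omega

-- Main bridging lemma: a sum of F over per-year lookups along a duplicate-free list of
-- years equals the sum of F over the entries of the index whose key lies in that list.
theorem sum_map_getYear (F : List (List (String × Int)) → Int) (hF : F [] = 0)
    (year_index : List (Int × List (List (String × Int))))
    (hyi : (year_index.map Prod.fst).Nodup) (R : List Int) (hR : R.Nodup) :
    (R.map (fun y => F (getYear year_index y))).sum
      = ((year_index.filter (fun p => decide (p.1 ∈ R))).map (fun p => F p.2)).sum := by
  induction year_index with
  | nil =>
    simp only [List.filter_nil, List.map_nil, List.sum_nil]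
    have : (R.map (fun y => F (getYear [] y))) = R.map (fun _ => (0 : Int)) := by
      apply List.map_congr_left; intro y _; simp [getYear, hF]
    simp [this]
  | cons p rest ih =>
    obtain ⟨k, v⟩ := p
    have hk : k ∉ rest.map Prod.fst := (List.nodup_cons.mp hyi).1
    have hrest := (List.nodup_cons.mp hyi).2
    have step : (R.map (fun y => F (getYear ((k, v) :: rest) y))) =
        (R.map (fun y => F (if k = y then v else getYear rest y))) := by
      apply List.map_congr_left; intro y _; rw [getYear_cons]
    rw [step, sum_if_key F hF k v rest hk R hR, ih hrest]
    by_cases hmem : k ∈ R <;> simp [hmem]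

-- A's loop with a pair accumulator is two independent sums.
theorem foldl_pair (f g : Int → Int) :
    ∀ (R : List Int) (a b : Int),
      R.foldl (fun acc y => (acc.1 + f y, acc.2 + g y)) (a, b)
        = (a + (R.map f).sum, b + (R.map g).sum) := by
  intro R
  induction R with
  | nil => simp
  | cons y R' ih =>
    intro a b
    simp only [List.foldl_cons, List.map_cons, List.sum_cons, ih, Prod.mk.injEq]
    constructor <;> ring

theorem length_flatMap_int (l : List ((Int × List (List (String × Int))))) :
    (((l.flatMap (fun p => p.2)).length : Nat) : Int)
      = (l.map (fun p => ((p.2.length : Nat) : Int))).sum := by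
  induction l with
  | nil => simp
  | cons p rest ih =>
    simp only [List.flatMap_cons, List.length_append, List.map_cons, List.sum_cons, ← ih]
    push_cast; ring

theorem sum_citeOf_flatMap (l : List ((Int × List (List (String × Int))))) :
    ((l.flatMap (fun p => p.2)).map citeOf).sum
      = (l.map (fun p => (p.2.map citeOf).sum)).sum := by
  induction l with
  | nil => simp
  | cons p rest ih => simp [List.flatMap_cons, ih]

-- ===== VERDICT (by name: the statement is the Claim_ definition above) =====
theorem aggregate_segment_stats_spec : Claim_equal_aggregate_segment_stats := by
  intro year_index start_year end_year _hDom hPre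
  unfold Spec_aggregate_segment_stats
  unfold aggregate_segment_stats aggregate_segment_stats_alt
  set R := PySem.List.pyRange start_year (end_year + 1) 1 with hRdef
  have hR : R.Nodup := PySem.List.nodup_pyRange_one start_year (end_year + 1)
  have hfilter : (year_index.filter (fun p => decide (p.1 ∈ R)))
      = (year_index.filter (fun p => decide (start_year ≤ p.1 ∧ p.1 ≤ end_year))) := by
    apply List.filter_congr
    intro p _
    simp only [decide_eq_decide, hRdef, PySem.List.mem_pyRange_one]
    omega
  have hfun : (fun (acc : Int × Int) y =>
        let docs := getYear year_index y
        (acc.1 + (docs.length : Int), acc.2 + (docs.map citeOf).sum))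
      = (fun (acc : Int × Int) y =>
        (acc.1 + ((getYear year_index y).length : Int),
         acc.2 + (((getYear year_index y).map citeOf).sum))) := rfl
  rw [hfun, foldl_pair (fun y => ((getYear year_index y).length : Int))
        (fun y => ((getYear year_index y).map citeOf).sum) R 0 0]
  rw [sum_map_getYear (fun docs => ((docs.length : Nat) : Int)) (by simp)
        year_index hPre.1 R hR,
      sum_map_getYear (fun docs => (docs.map citeOf).sum) (by simp)
        year_index hPre.1 R hR, hfilter]
  simp only [length_flatMap_int, sum_citeOf_flatMap, zero_add]
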